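-- pv_equiv track=rewrite | github.com/JayZenith/zarathustra | experiment_runner.py | _infer_signature
-- ===== SOURCE A (Python) =====
-- def _infer_signature(description: str, hypothesis: str) -> str:
--     text = f"{description} {hypothesis}".lower()
--     if "matrix_lr" in text or "matrix lr" in text:
--         if any(term in text for term in ("lower", "less", "decrease", "reduce")):
--             return "param:MATRIX_LR:down"
--         if any(term in text for term in ("higher", "increase", "raise")):
--             return "param:MATRIX_LR:up"
--         return "param:MATRIX_LR"
--     if "warmdown" in text:
--         if any(term in text for term in ("higher", "increase", "longer", "more")):
--             return "param:WARMDOWN_RATIO:up"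
--         if any(term in text for term in ("lower", "decrease", "reduce", "shorter", "less")):
--             return "param:WARMDOWN_RATIO:down"
--         return "param:WARMDOWN_RATIO"
--     if "weight_decay" in text or "weight decay" in text or "wd" in text:
--         if any(term in text for term in ("lower", "decrease", "reduce", "less")):
--             return "param:WEIGHT_DECAY:down"
--         if any(term in text for term in ("higher", "increase", "raise", "more")):
--             return "param:WEIGHT_DECAY:up"
--         return "param:WEIGHT_DECAY"
--     if "embedding_lr" in text or "embedding lr" in text:
--         if any(term in text for term in ("lower", "decrease", "reduce", "ablate", "less")):
--             return "param:EMBEDDING_LR:down"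
--         if any(term in text for term in ("higher", "increase", "raise", "more")):
--             return "param:EMBEDDING_LR:up"
--         return "param:EMBEDDING_LR"
--     if "final_lr" in text or "final lr" in text:
--         if any(term in text for term in ("lower", "decrease", "reduce", "less")):
--             return "param:FINAL_LR_FRAC:down"
--         if any(term in text for term in ("higher", "increase", "raise", "more")):
--             return "param:FINAL_LR_FRAC:up"
--         return "param:FINAL_LR_FRAC"
--     if "silu" in text or "relu" in text or "swiglu" in text:
--         if "silu" in text:
--             return "activation:SILU"
--         if "swiglu" in text:
--             return "activation:SWIGLU"
--         return "activation"
--     return ""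
-- ===== SOURCE B (Python) =====
-- # Flat feature pass + arithmetic selection: score every trigger pattern with a
-- # priority index, pick the category as min(priorities of matched triggers), then
-- # look the direction up in per-category tables -- no if-cascade.
--
-- _TRIGGERS = [
--     ("matrix_lr", 0), ("matrix lr", 0),
--     ("warmdown", 1),
--     ("weight_decay", 2), ("weight decay", 2), ("wd", 2),
--     ("embedding_lr", 3), ("embedding lr", 3),
--     ("final_lr", 4), ("final lr", 4),
--     ("silu", 5), ("relu", 5), ("swiglu", 5),
-- ]
--
-- _BASES = ["param:MATRIX_LR", "param:WARMDOWN_RATIO", "param:WEIGHT_DECAY",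
--           "param:EMBEDDING_LR", "param:FINAL_LR_FRAC", "activation"]
--
-- _DIRS = [
--     [("down", ("lower", "less", "decrease", "reduce")),
--      ("up", ("higher", "increase", "raise"))],
--     [("up", ("higher", "increase", "longer", "more")),
--      ("down", ("lower", "decrease", "reduce", "shorter", "less"))],
--     [("down", ("lower", "decrease", "reduce", "less")),
--      ("up", ("higher", "increase", "raise", "more"))],
--     [("down", ("lower", "decrease", "reduce", "ablate", "less")),
--      ("up", ("higher", "increase", "raise", "more"))],
--     [("down", ("lower", "decrease", "reduce", "less")),
--      ("up", ("higher", "increase", "raise", "more"))],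
--     [("SILU", ("silu",)),
--      ("SWIGLU", ("swiglu",))],
-- ]
--
--
-- def _infer_signature(description: str, hypothesis: str) -> str:
--     text = f"{description} {hypothesis}".lower()
--     hits = [k for p, k in _TRIGGERS if p in text]
--     if not hits:
--         return ""
--     k = min(hits)
--     suffixes = [s for s, terms in _DIRS[k] if any(t in text for t in terms)]
--     if suffixes:
--         return _BASES[k] + ":" + suffixes[0]
--     return _BASES[k]
-- ===== Notes on version B (the rewrite author's own statement) =====
-- stated objective: alternative
-- what changed: Replaces A's six hand-written if-cascades by a single flat pass that scores every trigger substring with a priority index; min() of the matched priorities selects the category (correct because the trigger table lists priorities in A's cascade order), and base label and direction come from indexed tables instead of per-category code.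
import Mathlib
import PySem

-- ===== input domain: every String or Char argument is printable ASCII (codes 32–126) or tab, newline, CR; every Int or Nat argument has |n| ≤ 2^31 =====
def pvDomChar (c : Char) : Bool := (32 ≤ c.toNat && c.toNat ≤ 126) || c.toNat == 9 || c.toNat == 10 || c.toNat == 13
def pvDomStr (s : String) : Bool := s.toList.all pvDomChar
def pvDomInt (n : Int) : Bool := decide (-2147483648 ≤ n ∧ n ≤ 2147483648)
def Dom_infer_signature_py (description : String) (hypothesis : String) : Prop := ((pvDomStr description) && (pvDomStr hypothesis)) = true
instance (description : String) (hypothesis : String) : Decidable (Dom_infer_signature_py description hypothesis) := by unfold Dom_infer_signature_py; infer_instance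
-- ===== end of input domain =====

-- B replaces A's hand-written if-cascade by one flat pass scoring every trigger pattern with a priority index; min of the matched priorities selects the category, table lookups give base and direction (alternative decomposition, same behaviour and cost).

-- ===== PORT A =====
def infer_signature_py (description : String) (hypothesis : String) : String :=
  let text := PySem.Str.lower (description ++ " " ++ hypothesis)
  if PySem.Str.isIn "matrix_lr" text || PySem.Str.isIn "matrix lr" text then
    if ["lower", "less", "decrease", "reduce"].any (fun term => PySem.Str.isIn term text) then
      "param:MATRIX_LR:down"
    else if ["higher", "increase", "raise"].any (fun term => PySem.Str.isIn term text) then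
      "param:MATRIX_LR:up"
    else "param:MATRIX_LR"
  else if PySem.Str.isIn "warmdown" text then
    if ["higher", "increase", "longer", "more"].any (fun term => PySem.Str.isIn term text) then
      "param:WARMDOWN_RATIO:up"
    else if ["lower", "decrease", "reduce", "shorter", "less"].any (fun term => PySem.Str.isIn term text) then
      "param:WARMDOWN_RATIO:down"
    else "param:WARMDOWN_RATIO"
  else if PySem.Str.isIn "weight_decay" text || PySem.Str.isIn "weight decay" text || PySem.Str.isIn "wd" text then
    if ["lower", "decrease", "reduce", "less"].any (fun term => PySem.Str.isIn term text) then
      "param:WEIGHT_DECAY:down"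
    else if ["higher", "increase", "raise", "more"].any (fun term => PySem.Str.isIn term text) then
      "param:WEIGHT_DECAY:up"
    else "param:WEIGHT_DECAY"
  else if PySem.Str.isIn "embedding_lr" text || PySem.Str.isIn "embedding lr" text then
    if ["lower", "decrease", "reduce", "ablate", "less"].any (fun term => PySem.Str.isIn term text) then
      "param:EMBEDDING_LR:down"
    else if ["higher", "increase", "raise", "more"].any (fun term => PySem.Str.isIn term text) then
      "param:EMBEDDING_LR:up"
    else "param:EMBEDDING_LR"
  else if PySem.Str.isIn "final_lr" text || PySem.Str.isIn "final lr" text then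
    if ["lower", "decrease", "reduce", "less"].any (fun term => PySem.Str.isIn term text) then
      "param:FINAL_LR_FRAC:down"
    else if ["higher", "increase", "raise", "more"].any (fun term => PySem.Str.isIn term text) then
      "param:FINAL_LR_FRAC:up"
    else "param:FINAL_LR_FRAC"
  else if PySem.Str.isIn "silu" text || PySem.Str.isIn "relu" text || PySem.Str.isIn "swiglu" text then
    if PySem.Str.isIn "silu" text then "activation:SILU"
    else if PySem.Str.isIn "swiglu" text then "activation:SWIGLU"
    else "activation"
  else ""

-- ===== PORT B =====
-- every trigger substring with the priority index of its category (ascending)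
def sigTriggers : List (String × Nat) :=
  [("matrix_lr", 0), ("matrix lr", 0),
   ("warmdown", 1),
   ("weight_decay", 2), ("weight decay", 2), ("wd", 2),
   ("embedding_lr", 3), ("embedding lr", 3),
   ("final_lr", 4), ("final lr", 4),
   ("silu", 5), ("relu", 5), ("swiglu", 5)]

def sigBases : List String :=
  ["param:MATRIX_LR", "param:WARMDOWN_RATIO", "param:WEIGHT_DECAY",
   "param:EMBEDDING_LR", "param:FINAL_LR_FRAC", "activation"]

def sigDirs : List (List (String × List String)) :=
  [[("down", ["lower", "less", "decrease", "reduce"]),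
    ("up", ["higher", "increase", "raise"])],
   [("up", ["higher", "increase", "longer", "more"]),
    ("down", ["lower", "decrease", "reduce", "shorter", "less"])],
   [("down", ["lower", "decrease", "reduce", "less"]),
    ("up", ["higher", "increase", "raise", "more"])],
   [("down", ["lower", "decrease", "reduce", "ablate", "less"]),
    ("up", ["higher", "increase", "raise", "more"])],
   [("down", ["lower", "decrease", "reduce", "less"]),
    ("up", ["higher", "increase", "raise", "more"])],
   [("SILU", ["silu"]),
    ("SWIGLU", ["swiglu"])]]

def infer_signature_py_alt (description : String) (hypothesis : String) : String :=
  let text := PySem.Str.lower (description ++ " " ++ hypothesis)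
  let hits := (sigTriggers.filter (fun pk => PySem.Str.isIn pk.1 text)).map (fun pk => pk.2)
  match PySem.List.min? hits (fun x => x) with
  | none => ""
  | some k =>
    let base := sigBases.getD k ""
    let suffixes := ((sigDirs.getD k []).filter
        (fun st => st.2.any (fun t => PySem.Str.isIn t text))).map (fun st => st.1)
    match suffixes with
    | [] => base
    | s :: _ => base ++ ":" ++ s

-- ===== PRECONDITION & SPEC =====
def Spec_infer_signature_py (description : String) (hypothesis : String) (out : String) : Prop := out = infer_signature_py_alt description hypothesis
instance (description : String) (hypothesis : String) (out : String) : Decidable (Spec_infer_signature_py description hypothesis out) := by unfold Spec_infer_signature_py; infer_instance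

-- ===== CLAIM (what is proved, stated in full; the proofs are below) =====
def Claim_equal_infer_signature_py : Prop := ∀ (description : String) (hypothesis : String), Dom_infer_signature_py description hypothesis → Spec_infer_signature_py description hypothesis (infer_signature_py description hypothesis)

-- ===== LEMMAS AND PROOFS =====

-- Python min() on an already-ascending list is its first element
lemma min?_id_eq_head?_of_sorted (l : List Nat) (h : l.Pairwise (· ≤ ·)) :
    PySem.List.min? l (fun x => x) = l.head? := by
  cases l with
  | nil => simp [PySem.List.min?_eq_none_iff]
  | cons x t =>
    rw [PySem.List.min?_id_cons]
    have h1 := (PySem.List.foldl_min_le t x).1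
    have h2 : ∀ y ∈ t, x ≤ y := fun y hy => (List.pairwise_cons.mp h).1 y hy
    have hx : t.foldl min x = x := by
      rcases PySem.List.foldl_min_mem t x with h3 | h3
      · exact h3
      · exact le_antisymm h1 (h2 _ h3)
    simp [hx]

-- one filter step under map/head?, kept linear (no duplication of the tail)
lemma head?_map_filter_cons {α β : Type} (p : α → Bool) (f : α → β) (a : α) (l : List α) :
    (((a :: l).filter p).map f).head? = if p a then some (f a) else ((l.filter p).map f).head? := by
  rw [List.filter_cons]; split_ifs <;> simp

-- a Bool-disjunction condition, atomized
lemma bor_ite {α : Type} (a b : Bool) (x y : α) :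
    (if a || b then x else y) = if a then x else if b then x else y := by
  cases a <;> simp

-- the min of the priorities of the matched triggers is the priority of the first matched group
lemma sig_min_eval (text : String) :
    PySem.List.min? ((sigTriggers.filter (fun pk => PySem.Str.isIn pk.1 text)).map (fun pk => pk.2)) (fun x => x)
    = (if PySem.Str.isIn "matrix_lr" text || PySem.Str.isIn "matrix lr" text then some 0
       else if PySem.Str.isIn "warmdown" text then some 1
       else if PySem.Str.isIn "weight_decay" text || PySem.Str.isIn "weight decay" text || PySem.Str.isIn "wd" text then some 2
       else if PySem.Str.isIn "embedding_lr" text || PySem.Str.isIn "embedding lr" text then some 3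
       else if PySem.Str.isIn "final_lr" text || PySem.Str.isIn "final lr" text then some 4
       else if PySem.Str.isIn "silu" text || PySem.Str.isIn "relu" text || PySem.Str.isIn "swiglu" text then some 5
       else none) := by
  rw [min?_id_eq_head?_of_sorted]
  · simp only [sigTriggers, head?_map_filter_cons, List.filter_nil, List.map_nil, List.head?_nil,
      bor_ite]
  · exact List.Pairwise.sublist ((List.filter_sublist).map _) (by decide)

-- ===== VERDICT (by name: the statement is the Claim_ definition above) =====
theorem infer_signature_py_spec : Claim_equal_infer_signature_py := by
  intro description hypothesis _
  show infer_signature_py description hypothesis = infer_signature_py_alt description hypothesis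
  simp only [infer_signature_py, infer_signature_py_alt]
  rw [sig_min_eval]
  split_ifs <;>
    simp_all [sigBases, sigDirs, List.filter_cons, List.filter_nil]
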